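-- pv_equiv track=rewrite | github.com/hellory4n/zglm | swizzle_gen.py | gen_swizzles
-- ===== SOURCE A (Python) =====
-- import itertools
--
-- def gen_swizzles(components):
--     code = ""
--
--     for length in range(1, 5):
--         for combo in itertools.product(components, repeat=length):
--             name = ''.join(combo)
--             ret_type = ''
--             if length == 1:
--                 ret_type='childOfVec(@TypeOf(src))'
--             else:
--                 ret_type = f"@Vector({length}, childOfVec(@TypeOf(src)))"
--
--             args = ', '.join(f"src[{components.index(c)}]" for c in combo)
--             body = f"return .{{{args}}};"
--
--             code += f"pub fn {name}(src: anytype) {ret_type} {{ {body} }}\n"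
--     return code
-- ===== SOURCE B (Python) =====
-- def gen_swizzles(components):
--     # map each component to its first index once, instead of calling list.index per element
--     first = {}
--     for i, c in enumerate(components):
--         if c not in first:
--             first[c] = i
--     lines = []
--     prefixes = [("", [])]  # (name so far, list of "src[i]" arg strings so far)
--     for length in range(1, 5):
--         prefixes = [(name + c, args + [f"src[{first[c]}]"])
--                     for name, args in prefixes for c in components]
--         if length == 1:
--             ret = 'childOfVec(@TypeOf(src))'
--         else:
--             ret = f"@Vector({length}, childOfVec(@TypeOf(src)))"
--         for name, args in prefixes:
--             lines.append(f"pub fn {name}(src: anytype) {ret} {{ return .{{{', '.join(args)}}}; }}\n")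
--     return ''.join(lines)
-- ===== Notes on version B (the rewrite author's own statement) =====
-- stated objective: alternative
-- what changed: Replaces the per-length itertools.product enumeration and the per-element components.index calls inside the inner loop by an incremental prefix builder that carries each combo's name and arg strings from one length to the next, with a first-occurrence index dict built once; lines are collected in a list and joined once instead of repeated string +=.
import Mathlib
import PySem

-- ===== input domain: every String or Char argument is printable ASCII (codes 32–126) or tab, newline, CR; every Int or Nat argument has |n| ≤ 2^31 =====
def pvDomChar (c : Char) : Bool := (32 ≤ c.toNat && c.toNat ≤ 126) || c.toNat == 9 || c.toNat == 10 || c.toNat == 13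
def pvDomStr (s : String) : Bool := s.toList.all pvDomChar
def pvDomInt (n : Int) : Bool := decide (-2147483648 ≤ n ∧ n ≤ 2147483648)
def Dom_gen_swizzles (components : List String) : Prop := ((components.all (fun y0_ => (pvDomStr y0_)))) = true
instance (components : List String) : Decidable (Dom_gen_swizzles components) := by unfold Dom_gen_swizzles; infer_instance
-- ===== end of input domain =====

-- B replaces the per-length itertools.product enumeration and the per-element list.index calls by an
-- incremental prefix builder (name and arg strings carried along) with a first-occurrence index dict
-- built once; objective: alternative decomposition, same output.

-- ===== PORT A =====
-- itertools.product(components, repeat=n), in product's order (first position varies slowest)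
def pvProdRep (components : List String) : Nat → List (List String)
  | 0 => [[]]
  | n + 1 => components.flatMap (fun c => (pvProdRep components n).map (fun rest => c :: rest))

def gen_swizzles (components : List String) : String :=
  (PySem.List.pyRange 1 5 1).foldl (fun code length =>
    (pvProdRep components length.toNat).foldl (fun code combo =>
      let name := PySem.Str.join "" combo
      let ret_type : String :=
        if length == 1 then "childOfVec(@TypeOf(src))"
        else "@Vector(" ++ PySem.Int.toStr length ++ ", childOfVec(@TypeOf(src)))"
      -- components.index(c): c is drawn from components, so .index never raises; the getD 0 is unreachable
      let args := PySem.Str.join ", " (combo.map (fun c =>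
        "src[" ++ PySem.Int.toStr (((PySem.List.index? components c).getD 0 : Nat) : Int) ++ "]"))
      let body := "return .{" ++ args ++ "};"
      code ++ ("pub fn " ++ name ++ "(src: anytype) " ++ ret_type ++ " { " ++ body ++ " }\n")) code) ""

-- ===== PORT B =====
-- the first-occurrence dict: for i, c in enumerate(components): if c not in first: first[c] = i
def pvBuildFirst : PySem.Dict String Int → List (Int × String) → PySem.Dict String Int
  | d, [] => d
  | d, (i, c) :: rest => pvBuildFirst (if d.contains c then d else d.insert c i) rest

def gen_swizzles_alt (components : List String) : String :=
  let first := pvBuildFirst PySem.Dict.empty (PySem.List.enumerate components 0)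
  let res := (PySem.List.pyRange 1 5 1).foldl
    (fun (st : List String × List (String × List String)) length =>
      let prefixes := st.2.flatMap (fun p => components.map (fun c =>
        (p.1 ++ c, p.2 ++ ["src[" ++ PySem.Int.toStr (first.getD c 0) ++ "]"])))
      let ret : String :=
        if length == 1 then "childOfVec(@TypeOf(src))"
        else "@Vector(" ++ PySem.Int.toStr length ++ ", childOfVec(@TypeOf(src)))"
      let lines := prefixes.foldl (fun ls p =>
        ls ++ ["pub fn " ++ p.1 ++ "(src: anytype) " ++ ret ++
               " { return .{" ++ PySem.Str.join ", " p.2 ++ "}; }\n"]) st.1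
      (lines, prefixes))
    ([], [("", [])])
  PySem.Str.join "" res.1

-- ===== PRECONDITION & SPEC =====
def Spec_gen_swizzles (components : List String) (out : String) : Prop := out = gen_swizzles_alt components
instance (components : List String) (out : String) : Decidable (Spec_gen_swizzles components out) := by unfold Spec_gen_swizzles; infer_instance

-- ===== CLAIM (what is proved, stated in full; the proofs are below) =====
def Claim_equal_gen_swizzles : Prop := ∀ (components : List String), Dom_gen_swizzles components → Spec_gen_swizzles components (gen_swizzles components)

-- ===== LEMMAS AND PROOFS =====

-- named pieces of the two loop bodies (definitionally equal to the ports' let-bodies)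
def pvItemA (components : List String) (c : String) : String :=
  "src[" ++ PySem.Int.toStr (((PySem.List.index? components c).getD 0 : Nat) : Int) ++ "]"

def pvRet (length : Int) : String :=
  if length == 1 then "childOfVec(@TypeOf(src))"
  else "@Vector(" ++ PySem.Int.toStr length ++ ", childOfVec(@TypeOf(src)))"

def pvLineA (components : List String) (length : Int) (combo : List String) : String :=
  "pub fn " ++ PySem.Str.join "" combo ++ "(src: anytype) " ++ pvRet length ++ " { " ++
    ("return .{" ++ PySem.Str.join ", " (combo.map (pvItemA components)) ++ "};") ++ " }\n"

def pvFirst (components : List String) : PySem.Dict String Int :=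
  pvBuildFirst PySem.Dict.empty (PySem.List.enumerate components 0)

def pvItemB (first : PySem.Dict String Int) (c : String) : String :=
  "src[" ++ PySem.Int.toStr (first.getD c 0) ++ "]"

def pvPair (first : PySem.Dict String Int) (combo : List String) : String × List String :=
  (combo.foldl (· ++ ·) "", combo.map (pvItemB first))

def pvEmit (length : Int) (p : String × List String) : String :=
  "pub fn " ++ p.1 ++ "(src: anytype) " ++ pvRet length ++
    " { return .{" ++ PySem.Str.join ", " p.2 ++ "}; }\n"

-- string-fold toolbox
theorem pv_chars_join_nilsep (l : List (List Char)) : PySem.Chars.join [] l = l.flatten := by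
  match l with
  | [] => simp [PySem.Chars.join_nil]
  | [p] => simp [PySem.Chars.join_singleton]
  | p :: q :: rest =>
    rw [PySem.Chars.join_cons_cons]
    simp [pv_chars_join_nilsep (q :: rest)]

theorem pv_foldl_app (L : List String) (a : String) :
    L.foldl (· ++ ·) a = a ++ L.foldl (· ++ ·) "" := by
  induction L generalizing a with
  | nil => simp [List.foldl]
  | cons x L ih =>
    simp only [List.foldl]
    rw [ih (a ++ x), ih ("" ++ x), String.empty_append, String.append_assoc]

theorem pv_join_empty (xs : List String) : PySem.Str.join "" xs = xs.foldl (· ++ ·) "" := by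
  induction xs with
  | nil => rfl
  | cons x L ih =>
    have h2 : (x :: L).foldl (· ++ ·) "" = x ++ L.foldl (· ++ ·) "" := by
      simp only [List.foldl]
      rw [pv_foldl_app, String.empty_append]
    rw [h2]
    apply String.ext
    rw [PySem.Str.toList_join, String.toList_append, ← ih, PySem.Str.toList_join]
    simp [pv_chars_join_nilsep]

theorem pv_sconcat_append (a b : List String) :
    (a ++ b).foldl (· ++ ·) "" = a.foldl (· ++ ·) "" ++ b.foldl (· ++ ·) "" := by
  rw [List.foldl_append, pv_foldl_app]

theorem pv_foldl_push {α : Type} (f : α → String) (L : List α) (lines : List String) :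
    L.foldl (fun ls p => ls ++ [f p]) lines = lines ++ L.map f := by
  induction L generalizing lines with
  | nil => simp
  | cons x L ih => simp [List.foldl, ih]

-- dict lemmas: the dict built by pvBuildFirst maps each member to its first index
theorem pvBuildFirst_frame (l : List (Int × String)) : ∀ (d : PySem.Dict String Int) (c : String),
    d.contains c = true → (pvBuildFirst d l).getD c 0 = d.getD c 0 := by
  induction l with
  | nil => intro d c _; rfl
  | cons p rest ih =>
    intro d c h
    obtain ⟨i, c'⟩ := p
    show (pvBuildFirst (if d.contains c' then d else d.insert c' i) rest).getD c 0 = _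
    by_cases hc : d.contains c' = true
    · rw [if_pos hc]; exact ih d c h
    · rw [if_neg hc]
      have hne : c ≠ c' := by intro e; rw [e] at h; exact absurd h (by simp [hc])
      have h2 : (d.insert c' i).contains c = true := by
        rw [PySem.Dict.contains_insert]; simp [h]
      rw [ih (d.insert c' i) c h2, PySem.Dict.getD_insert]
      simp [hne]

theorem pvBuildFirst_getD (xs : List String) : ∀ (s : Int) (d : PySem.Dict String Int) (c : String),
    c ∈ xs → d.contains c = false →
    (pvBuildFirst d (PySem.List.enumerate xs s)).getD c 0
      = s + (((PySem.List.index? xs c).getD 0 : Nat) : Int) := by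
  induction xs with
  | nil => intro s d c h; exact absurd h (List.not_mem_nil)
  | cons x xs ih =>
    intro s d c hmem hdc
    rw [PySem.List.enumerate_cons]
    show (pvBuildFirst (if d.contains x then d else d.insert x s) (PySem.List.enumerate xs (s+1))).getD c 0 = _
    by_cases hx : c = x
    · subst hx
      rw [hdc, if_neg (by simp)]
      have h2 : (d.insert c s).contains c = true := by
        rw [PySem.Dict.contains_insert]; simp
      rw [pvBuildFirst_frame _ _ _ h2, PySem.Dict.getD_insert, if_pos rfl, PySem.List.index?_cons_self]
      simp
    · have hmem' : c ∈ xs := by cases hmem with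
        | head => exact absurd rfl hx
        | tail _ h => exact h
      obtain ⟨k, hk⟩ := Option.isSome_iff_exists.mp ((PySem.List.index?_isSome_iff xs c).mpr hmem')
      have hrw : PySem.List.index? (x :: xs) c = some (k + 1) := by
        rw [PySem.List.index?_cons_of_ne xs (fun e => hx e.symm), hk]; rfl
      by_cases hc : d.contains x = true
      · rw [if_pos hc, ih (s+1) d c hmem' hdc, hk, hrw]
        simp only [Option.getD_some]; push_cast; ring
      · rw [if_neg hc]
        have hdc' : (d.insert x s).contains c = false := by
          rw [PySem.Dict.contains_insert]; simp [hdc, hx]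
        rw [ih (s+1) _ c hmem' hdc', hk, hrw]
        simp only [Option.getD_some]; push_cast; ring

theorem pv_first_eq_index (components : List String) (c : String) (h : c ∈ components) :
    (pvFirst components).getD c 0 = (((PySem.List.index? components c).getD 0 : Nat) : Int) := by
  rw [pvFirst, pvBuildFirst_getD components 0 _ c h (PySem.Dict.contains_empty c)]
  ring

-- prodRep lemmas
theorem pvProdRep_mem (components : List String) :
    ∀ (n : Nat) (combo : List String), combo ∈ pvProdRep components n → ∀ c ∈ combo, c ∈ components := by
  intro n
  induction n with
  | zero =>
    intro combo h c hc
    simp [pvProdRep] at h; subst h; exact absurd hc (List.not_mem_nil)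
  | succ n ih =>
    intro combo h c hc
    simp only [pvProdRep, List.mem_flatMap, List.mem_map] at h
    obtain ⟨x, hx, rest, hrest, heq⟩ := h
    subst heq
    cases hc with
    | head => exact hx
    | tail _ h2 => exact ih rest hrest c h2

theorem pvProdRep_snoc (components : List String) (n : Nat) :
    pvProdRep components (n + 1)
      = (pvProdRep components n).flatMap (fun p => components.map (fun c => p ++ [c])) := by
  induction n with
  | zero =>
    show components.flatMap (fun c => [[c]]) = [[]].flatMap (fun p => components.map (fun c => p ++ [c]))
    induction components with
    | nil => rfl
    | cons x xs ihc => simp_all [List.flatMap]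
  | succ n ih =>
    conv_lhs => rw [show pvProdRep components (n+2) = components.flatMap
      (fun c => (pvProdRep components (n+1)).map (fun rest => c :: rest)) from rfl, ih]
    conv_rhs => rw [show pvProdRep components (n+1) = components.flatMap
      (fun c => (pvProdRep components n).map (fun rest => c :: rest)) from rfl]
    simp [List.map_flatMap, List.flatMap_map, List.map_map, List.flatMap_assoc, Function.comp_def]

-- B's expansion step takes the pairs of length n to the pairs of length n+1
theorem pv_expand (components : List String) (first : PySem.Dict String Int) (n : Nat) :
    ((pvProdRep components n).map (pvPair first)).flatMap (fun p => components.map (fun c =>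
        (p.1 ++ c, p.2 ++ [pvItemB first c])))
      = (pvProdRep components (n + 1)).map (pvPair first) := by
  rw [pvProdRep_snoc]
  simp only [List.flatMap_map, List.map_flatMap, List.map_map]
  apply List.flatMap_congr
  intro q hq
  simp [Function.comp_def, pvPair, List.foldl_append, List.map_append]

-- the literal regrouping between A's " { " ++ body ++ " }\n" and B's one-piece line
theorem pv_regroup (X a : String) :
    ((X ++ " { ") ++ (("return .{" ++ a) ++ "};")) ++ " }\n"
      = ((X ++ " { return .{") ++ a) ++ "}; }\n" := by
  simp only [String.append_assoc]
  rw [show ("};" : String) ++ " }\n" = "}; }\n" from rfl]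
  congr 1

-- per-combo: A's emitted line = B's emitted line
theorem pv_line_eq (components : List String) (length : Int) (combo : List String)
    (hmem : ∀ c ∈ combo, c ∈ components) :
    pvLineA components length combo = pvEmit length (pvPair (pvFirst components) combo) := by
  have hargs : combo.map (pvItemB (pvFirst components)) = combo.map (pvItemA components) := by
    apply List.map_congr_left
    intro c hc
    rw [pvItemB, pvItemA, pv_first_eq_index components c (hmem c hc)]
  rw [pvLineA, pvEmit, pvPair, hargs, ← pv_join_empty]
  exact pv_regroup ("pub fn " ++ PySem.Str.join "" combo ++ "(src: anytype) " ++ pvRet length) _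

-- the main loop invariant, over any remaining list of lengths [n+1, n+2, …]
theorem pv_loop (components : List String) :
    ∀ (ls : List Int) (n : Nat) (code : String) (lines : List String)
      (prefixes : List (String × List String)),
    (∀ (i : Nat) (h : i < ls.length), ls[i] = (n : Int) + 1 + i) →
    code = PySem.Str.join "" lines →
    prefixes = (pvProdRep components n).map (pvPair (pvFirst components)) →
    ls.foldl (fun code length =>
        (pvProdRep components length.toNat).foldl
          (fun code combo => code ++ pvLineA components length combo) code) code
      = PySem.Str.join ""
          (ls.foldl (fun (st : List String × List (String × List String)) length =>
              ((st.2.flatMap (fun p => components.map (fun c =>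
                  (p.1 ++ c, p.2 ++ [pvItemB (pvFirst components) c])))).foldl
                 (fun acc p => acc ++ [pvEmit length p]) st.1,
               st.2.flatMap (fun p => components.map (fun c =>
                  (p.1 ++ c, p.2 ++ [pvItemB (pvFirst components) c])))))
            (lines, prefixes)).1 := by
  intro ls
  induction ls with
  | nil => intro n code lines prefixes _ hc _; exact hc
  | cons l ls ih =>
    intro n code lines prefixes hidx hc hp
    have hl : l = (n : Int) + 1 := by have := hidx 0 (by simp); simpa using this
    have hln : l.toNat = n + 1 := by rw [hl]; omega
    rw [List.foldl_cons, List.foldl_cons]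
    have hPm : prefixes.flatMap (fun p => components.map (fun c =>
        (p.1 ++ c, p.2 ++ [pvItemB (pvFirst components) c])))
        = (pvProdRep components (n + 1)).map (pvPair (pvFirst components)) := by
      rw [hp]; exact pv_expand components (pvFirst components) n
    have hidx' : ∀ (i : Nat) (h : i < ls.length), ls[i] = ((n + 1 : Nat) : Int) + 1 + i := by
      intro i hi
      have := hidx (i + 1) (by simpa using Nat.succ_lt_succ hi)
      simp only [List.getElem_cons_succ] at this
      rw [this]; push_cast; ring
    have hcode' : (pvProdRep components l.toNat).foldl
        (fun code combo => code ++ pvLineA components l combo) code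
        = PySem.Str.join ""
            ((prefixes.flatMap (fun p => components.map (fun c =>
                (p.1 ++ c, p.2 ++ [pvItemB (pvFirst components) c])))).foldl
              (fun acc p => acc ++ [pvEmit l p]) lines) := by
      rw [hln, show (pvProdRep components (n + 1)).foldl
          (fun code combo => code ++ pvLineA components l combo) code
          = ((pvProdRep components (n + 1)).map (pvLineA components l)).foldl (· ++ ·) code
          from (List.foldl_map).symm, pv_foldl_app, hc,
        hPm, pv_foldl_push, pv_join_empty (lines ++ _), pv_sconcat_append, ← pv_join_empty lines]
      congr 1
      rw [List.map_map]
      congr 1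
      apply List.map_congr_left
      intro combo hcombo
      rw [Function.comp_apply]
      exact pv_line_eq components l combo (pvProdRep_mem components (n + 1) combo hcombo)
    refine ih (n + 1) _ _ _ hidx' ?_ ?_
    · exact hcode'
    · simpa using hPm

-- ===== VERDICT (by name: the statement is the Claim_ definition above) =====
theorem gen_swizzles_spec : Claim_equal_gen_swizzles := by
  intro components _
  show gen_swizzles components = gen_swizzles_alt components
  have hr : PySem.List.pyRange 1 5 1 = [1, 2, 3, 4] := by decide
  have h := pv_loop components [1, 2, 3, 4] 0 "" [] [("", [])]
    (by decide) (by rfl) (by rfl)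
  rw [gen_swizzles, gen_swizzles_alt]
  rw [hr]
  exact h
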